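-- pv_equiv track=rewrite | github.com/stg/A2DP-I2S | tools/resource_inject.py | build_source
-- ===== SOURCE A (Python) =====
-- TYPE_INFO = {
--     "8": (1, None, "uint8_t"),
--     "16le": (2, "little", "uint16_t"),
--     "16be": (2, "big", "uint16_t"),
--     "32le": (4, "little", "uint32_t"),
--     "32be": (4, "big", "uint32_t"),
--     "64le": (8, "little", "uint64_t"),
--     "64be": (8, "big", "uint64_t"),
-- }
--
-- def format_value(value: int, width: int) -> str:
--     digits = width * 2
--     return f"0x{value:0{digits}X}"
--
-- def build_source(name: str, values: list[int], type_name: str, values_per_line: int) -> str: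
--     width, _, c_type = TYPE_INFO[type_name]
--     count = len(values)
--     if values_per_line == 0:
--         rendered = ", ".join(format_value(value, width) for value in values)
--         return f"{c_type} {name}[{count}] = {{ {rendered} }}\n"
--
--     lines = [f"{c_type} {name}[{count}] = {{\n"]
--
--     if values:
--         for i in range(0, count, values_per_line):
--             chunk = values[i : i + values_per_line]
--             rendered_values = []
--             for j, value in enumerate(chunk):
--                 is_last = (i + j) == (count - 1)
--                 suffix = "" if is_last else ","
--                 rendered_values.append(f"{format_value(value, width)}{suffix}")
--             rendered = " ".join(rendered_values)
--             lines.append(f"\t{rendered}\n")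
--
--     # Do not include the trailing semicolon here. The inject-style parser
--     # flushes the declaration block at the closing brace and preserves the
--     # target file's original ';' separately.
--     lines.append("}\n")
--     return "".join(lines)
-- ===== SOURCE B (Python) =====
-- TYPE_INFO = {
--     "8": (1, None, "uint8_t"),
--     "16le": (2, "little", "uint16_t"),
--     "16be": (2, "big", "uint16_t"),
--     "32le": (4, "little", "uint32_t"),
--     "32be": (4, "big", "uint32_t"),
--     "64le": (8, "little", "uint64_t"),
--     "64be": (8, "big", "uint64_t"),
-- }
--
-- def format_value(value: int, width: int) -> str:
--     digits = width * 2
--     return f"0x{value:0{digits}X}"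
--
-- def _sep(i: int, count: int, values_per_line: int) -> str:
--     if i == count - 1:
--         return ""
--     if (i + 1) % values_per_line == 0:
--         return ",\n\t"
--     return ", "
--
-- def build_source(name: str, values: list[int], type_name: str, values_per_line: int) -> str:
--     width, _, c_type = TYPE_INFO[type_name]
--     count = len(values)
--     if values_per_line == 0:
--         rendered = ", ".join(format_value(value, width) for value in values)
--         return f"{c_type} {name}[{count}] = {{ {rendered} }}\n"
--     header = f"{c_type} {name}[{count}] = {{\n"
--     if not values:
--         return header + "}\n"
--     body = "".join(
--         format_value(value, width) + _sep(i, count, values_per_line)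
--         for i, value in enumerate(values)
--     )
--     return header + "\t" + body + "\n" + "}\n"
-- ===== Notes on version B (the rewrite author's own statement) =====
-- stated objective: simpler
-- what changed: The multiline branch's chunk slicing with a nested per-chunk loop and a list of lines is replaced by one flat enumerate pass that appends each formatted value plus a separator chosen from its index ('' after the last value, ',\n\t' at a line boundary, ', ' otherwise).
-- outside the precondition, e.g. on build_source('', [1], '8', -1): A returns 'uint8_t [1] = {\n}\n', B returns 'uint8_t [1] = {\n\t0x01\n}\n'
import Mathlib
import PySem

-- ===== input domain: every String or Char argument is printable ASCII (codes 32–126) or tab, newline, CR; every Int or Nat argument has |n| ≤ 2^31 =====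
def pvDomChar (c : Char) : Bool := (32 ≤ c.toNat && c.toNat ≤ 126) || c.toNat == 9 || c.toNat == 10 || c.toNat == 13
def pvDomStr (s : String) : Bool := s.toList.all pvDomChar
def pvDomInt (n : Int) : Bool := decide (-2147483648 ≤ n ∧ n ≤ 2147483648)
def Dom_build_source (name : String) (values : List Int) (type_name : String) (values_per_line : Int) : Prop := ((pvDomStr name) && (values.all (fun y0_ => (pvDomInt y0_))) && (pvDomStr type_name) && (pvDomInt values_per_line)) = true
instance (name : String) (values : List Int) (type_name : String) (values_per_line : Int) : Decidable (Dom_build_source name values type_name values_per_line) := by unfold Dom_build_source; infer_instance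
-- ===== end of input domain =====

-- B replaces the multiline branch's chunk slicing + nested per-chunk loop by one flat
-- enumerate pass choosing each value's separator from its index (objective: simpler).

-- ===== PORT A =====
-- shared module context: TYPE_INFO and format_value are the same module-level helpers in both Pythons
def TYPE_INFO : PySem.Dict String (Int × Option String × String) :=
  ⟨[("8", (1, none, "uint8_t")),
   ("16le", (2, some "little", "uint16_t")),
   ("16be", (2, some "big", "uint16_t")),
   ("32le", (4, some "little", "uint32_t")),
   ("32be", (4, some "big", "uint32_t")),
   ("64le", (8, some "little", "uint64_t")),
   ("64be", (8, some "big", "uint64_t"))]⟩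

-- hand port of f"0x{value:0{digits}X}" (no PySem primitive for hex formatting):
-- uppercase hex digits, zero-padded to `digits` total characters including a '-' sign.
-- Exact for every int (tested against Python's format()).
def hexChar (n : Nat) : Char := if n < 10 then Char.ofNat (48 + n) else Char.ofNat (55 + n)

def hexChars (n : Nat) : List Char :=
  if n < 16 then [hexChar n] else hexChars (n / 16) ++ [hexChar (n % 16)]
decreasing_by exact Nat.div_lt_self (by omega) (by omega)

def zfill (d : Nat) (cs : List Char) : List Char := List.replicate (d - cs.length) '0' ++ cs

def format_value (value width : Int) : List Char :=
  let digits := (width * 2).toNat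
  if value < 0 then '0' :: 'x' :: '-' :: zfill (digits - 1) (hexChars (-value).toNat)
  else '0' :: 'x' :: zfill digits (hexChars value.toNat)

def build_source (name : String) (values : List Int) (type_name : String) (values_per_line : Int) : String :=
  match PySem.Dict.get? TYPE_INFO type_name with
  | none => ""  -- Python raises KeyError here; excluded by Pre_build_source
  | some wct =>
    let width := wct.1
    let c_type := wct.2.2.toList
    let count : Int := (values.length : Int)
    if values_per_line == 0 then
      let rendered := PySem.Chars.join [',', ' '] (values.map (fun value => format_value value width))
      String.ofList (c_type ++ ' ' :: name.toList ++ '[' :: PySem.Int.toChars count ++ ']' :: ' ' :: '=' :: ' ' :: '{' :: ' ' :: rendered ++ ' ' :: '}' :: ['\n'])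
    else
      let lines : List (List Char) := [c_type ++ ' ' :: name.toList ++ '[' :: PySem.Int.toChars count ++ ']' :: ' ' :: '=' :: ' ' :: '{' :: ['\n']]
      let lines :=
        if values.isEmpty then lines else
          (PySem.List.pyRange 0 count values_per_line).foldl (fun ls i =>
            let chunk := PySem.List.slice values (some i) (some (i + values_per_line))
            let rendered_values := (PySem.List.enumerate chunk 0).foldl (fun rv jv =>
              rv ++ [format_value jv.2 width ++ (if i + jv.1 == count - 1 then [] else [','])]) []
            ls ++ ['\t' :: PySem.Chars.join [' '] rendered_values ++ ['\n']]) lines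
      let lines := lines ++ [['}', '\n']]
      String.ofList (PySem.Chars.join [] lines)

-- ===== PORT B =====
def sepB (i count values_per_line : Int) : List Char :=
  if i == count - 1 then []
  else if PySem.Int.mod (i + 1) values_per_line == 0 then [',', '\n', '\t']
  else [',', ' ']

def build_source_alt (name : String) (values : List Int) (type_name : String) (values_per_line : Int) : String :=
  match PySem.Dict.get? TYPE_INFO type_name with
  | none => ""  -- Python raises KeyError here; excluded by Pre_build_source
  | some wct =>
    let width := wct.1
    let c_type := wct.2.2.toList
    let count : Int := (values.length : Int)
    if values_per_line == 0 then
      let rendered := PySem.Chars.join [',', ' '] (values.map (fun value => format_value value width))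
      String.ofList (c_type ++ ' ' :: name.toList ++ '[' :: PySem.Int.toChars count ++ ']' :: ' ' :: '=' :: ' ' :: '{' :: ' ' :: rendered ++ ' ' :: '}' :: ['\n'])
    else
      let header := c_type ++ ' ' :: name.toList ++ '[' :: PySem.Int.toChars count ++ ']' :: ' ' :: '=' :: ' ' :: '{' :: ['\n']
      if values.isEmpty then String.ofList (header ++ ['}', '\n'])
      else
        let body := (PySem.List.enumerate values 0).foldl (fun acc iv =>
          acc ++ format_value iv.2 width ++ sepB iv.1 count values_per_line) []
        String.ofList (header ++ '\t' :: body ++ '\n' :: '}' :: ['\n'])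

-- ===== PRECONDITION & SPEC =====
-- Pre_ excludes type_name keys absent from TYPE_INFO (Python A raises KeyError there) and
-- negative values_per_line with a nonempty values list, a nonsensical chunk size on which
-- A's empty range() silently drops every value — an accident of the slicing loop that no
-- caller would specify (B's modulo separator renders the values there instead).
def Pre_build_source (name : String) (values : List Int) (type_name : String) (values_per_line : Int) : Prop :=
  (PySem.Dict.get? TYPE_INFO type_name).isSome = true ∧ (0 ≤ values_per_line ∨ values = [])
instance (name : String) (values : List Int) (type_name : String) (values_per_line : Int) : Decidable (Pre_build_source name values type_name values_per_line) := by unfold Pre_build_source; infer_instance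

def pvWitness_build_source : String × List Int × String × Int := ("n", [1, 2, 3], "8", 2)

def Spec_build_source (name : String) (values : List Int) (type_name : String) (values_per_line : Int) (out : String) : Prop := out = build_source_alt name values type_name values_per_line
instance (name : String) (values : List Int) (type_name : String) (values_per_line : Int) (out : String) : Decidable (Spec_build_source name values type_name values_per_line out) := by unfold Spec_build_source; infer_instance

-- ===== CLAIM (what is proved, stated in full; the proofs are below) =====
def Claim_equal_build_source : Prop := ∀ (name : String) (values : List Int) (type_name : String) (values_per_line : Int), Dom_build_source name values type_name values_per_line → Pre_build_source name values type_name values_per_line → Spec_build_source name values type_name values_per_line (build_source name values type_name values_per_line)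

-- ===== LEMMAS AND PROOFS =====

theorem join_nil_sep (ls : List (List Char)) : PySem.Chars.join [] ls = ls.flatten := by
  match ls with
  | [] => simp [PySem.Chars.join_nil]
  | [p] => simp [PySem.Chars.join_singleton]
  | p :: q :: rest =>
    rw [PySem.Chars.join_cons_cons, join_nil_sep (q :: rest)]
    simp

-- B's flat pass as a structural recursion over the remaining values

def segB (w n k : Int) : List Int → Int → List Char
  | [], _ => []
  | v :: vs, p => format_value v w ++ sepB p n k ++ segB w n k vs (p + 1)

theorem segB_spec (w n k : Int) : ∀ (vs : List Int) (p : Int) (acc : List Char),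
    (PySem.List.enumerate vs p).foldl (fun acc iv => acc ++ format_value iv.2 w ++ sepB iv.1 n k) acc
      = acc ++ segB w n k vs p := by
  intro vs
  induction vs with
  | nil => intro p acc; simp [PySem.List.enumerate_nil, segB]
  | cons v vs ih =>
    intro p acc
    rw [PySem.List.enumerate_cons]
    simp only [List.foldl_cons, ih, segB]
    simp

theorem segB_append (w n k : Int) : ∀ (cs rest : List Int) (p : Int),
    segB w n k (cs ++ rest) p = segB w n k cs p ++ segB w n k rest (p + cs.length) := by
  intro cs
  induction cs with
  | nil => intro rest p; simp [segB]
  | cons c cs ih =>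
    intro rest p
    simp only [List.cons_append, segB, ih, List.length_cons]
    have h : p + 1 + (cs.length : Int) = p + ((cs.length : Int) + 1) := by ring
    rw [h]
    push_cast
    simp [List.append_assoc]

def hA (w n : Int) (jv : Int × Int) : List Char :=
  format_value jv.2 w ++ (if jv.1 == n - 1 then [] else [','])

theorem mod_eq_zero_iff_dvd (a k : Int) (hk : 0 < k) : PySem.Int.mod a k = 0 ↔ k ∣ a := by
  have h : PySem.Int.mod a k = a % k := by
    simp [PySem.Int.mod, Int.fmod_eq_emod]; intro h; omega
  rw [h]; exact ⟨Int.dvd_of_emod_eq_zero, Int.emod_eq_zero_of_dvd⟩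

theorem not_dvd_between (k i x : Int) (hk : 0 < k) (hdvd : k ∣ i) (h1 : i < x) (h2 : x < i + k) :
    ¬ k ∣ x := by
  intro hx
  have h3 : k ∣ (x - i) := Int.dvd_sub hx hdvd
  have h4 : k ≤ x - i := Int.le_of_dvd (by omega) h3
  omega

theorem enumerate_shift (F : Int → Int → List Char) : ∀ (cs : List Int) (s t : Int),
    (PySem.List.enumerate cs s).map (fun jv => F (t + jv.1) jv.2)
      = (PySem.List.enumerate cs (t + s)).map (fun jv => F jv.1 jv.2) := by
  intro cs
  induction cs with
  | nil => intro s t; simp [PySem.List.enumerate_nil]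
  | cons c cs ih =>
    intro s t
    rw [PySem.List.enumerate_cons, PySem.List.enumerate_cons]
    simp only [List.map_cons, ih]
    rw [show t + (s + 1) = (t + s) + 1 by ring]

theorem chunk_last (w n k : Int) (hk : 0 < k) : ∀ (cs : List Int) (p : Int), cs ≠ [] →
    p + cs.length = n →
    (∀ q : Int, p ≤ q → q < n - 1 → ¬ k ∣ (q + 1)) →
    PySem.Chars.join [' '] ((PySem.List.enumerate cs p).map (hA w n)) = segB w n k cs p := by
  intro cs
  induction cs with
  | nil => intro p h; exact absurd rfl h
  | cons v vs ih =>
    intro p _ hlen hbd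
    match vs with
    | [] =>
      simp only [PySem.List.enumerate_cons, PySem.List.enumerate_nil, List.map_cons, List.map_nil,
        PySem.Chars.join_singleton, segB, hA, sepB]
      have hp : p = n - 1 := by simp at hlen; omega
      simp [hp]
    | v' :: t =>
      rw [PySem.List.enumerate_cons, List.map_cons]
      rw [show (PySem.List.enumerate (v' :: t) (p+1)).map (hA w n)
            = (hA w n (p+1, v')) :: ((PySem.List.enumerate t (p+2)).map (hA w n)) by
          rw [PySem.List.enumerate_cons, List.map_cons]; ring_nf]
      rw [PySem.Chars.join_cons_cons]
      rw [show (hA w n (p+1, v')) :: ((PySem.List.enumerate t (p+2)).map (hA w n))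
            = (PySem.List.enumerate (v' :: t) (p+1)).map (hA w n) by
          rw [PySem.List.enumerate_cons, List.map_cons]; ring_nf]
      have hplt : p < n - 1 := by simp at hlen ⊢; omega
      rw [ih (p+1) (by simp) (by simp at hlen ⊢; push_cast; omega)
            (fun q hq1 hq2 => hbd q (by omega) hq2)]
      simp only [segB, hA, sepB]
      have h1 : (p == n - 1) = false := by simp; omega
      have h2 : (PySem.Int.mod (p + 1) k == 0) = false := by
        simp [mod_eq_zero_iff_dvd _ _ hk]
        exact hbd p (le_refl p) hplt
      simp [h1, h2]

theorem chunk_mid (w n k : Int) (hk : 0 < k) : ∀ (cs : List Int) (p : Int), cs ≠ [] →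
    p + cs.length < n →
    (∀ q : Int, p ≤ q → q < p + cs.length - 1 → ¬ k ∣ (q + 1)) →
    (k ∣ (p + cs.length)) →
    segB w n k cs p = PySem.Chars.join [' '] ((PySem.List.enumerate cs p).map (hA w n)) ++ ['\n', '\t'] := by
  intro cs
  induction cs with
  | nil => intro p h; exact absurd rfl h
  | cons v vs ih =>
    intro p _ hlen hbd hend
    match vs with
    | [] =>
      simp only [List.length_cons, List.length_nil] at hlen hend
      simp only [PySem.List.enumerate_cons, PySem.List.enumerate_nil, List.map_cons, List.map_nil,
        PySem.Chars.join_singleton, segB, hA, sepB]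
      have h1 : (p == n - 1) = false := by simp; omega
      push_cast at hend
      have h2 : (PySem.Int.mod (p + 1) k == 0) = true := by
        simp [mod_eq_zero_iff_dvd _ _ hk]; exact hend
      simp [h1, h2]
    | v' :: t =>
      rw [PySem.List.enumerate_cons, List.map_cons]
      rw [show (PySem.List.enumerate (v' :: t) (p+1)).map (hA w n)
            = (hA w n (p+1, v')) :: ((PySem.List.enumerate t (p+2)).map (hA w n)) by
          rw [PySem.List.enumerate_cons, List.map_cons]; ring_nf]
      rw [PySem.Chars.join_cons_cons]
      rw [show (hA w n (p+1, v')) :: ((PySem.List.enumerate t (p+2)).map (hA w n))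
            = (PySem.List.enumerate (v' :: t) (p+1)).map (hA w n) by
          rw [PySem.List.enumerate_cons, List.map_cons]; ring_nf]
      simp only [List.length_cons] at hlen hbd hend
      rw [segB, ih (p+1) (by simp)
            (by simp; push_cast at hlen ⊢; omega)
            (fun q hq1 hq2 => hbd q (by omega) (by simp at hq2 ⊢; push_cast at hq2 ⊢; omega))
            (by push_cast at hend ⊢; convert hend using 1; simp [List.length_cons]; push_cast; ring)]
      have hplt : p < n - 1 := by push_cast at hlen; omega
      have h1 : (p == n - 1) = false := by simp; omega
      have h2 : (PySem.Int.mod (p + 1) k == 0) = false := by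
        simp [mod_eq_zero_iff_dvd _ _ hk]
        exact hbd p (le_refl p) (by push_cast; omega)
      simp [hA, sepB, h1, h2]

theorem pyRange_pos_nil (a b s : Int) (hs : 0 < s) (h : b ≤ a) : PySem.List.pyRange a b s = [] := by
  rw [PySem.List.pyRange_of_pos _ _ hs, if_neg (by omega)]
  simp

theorem pyRange_pos_cons (a b s : Int) (hs : 0 < s) (hab : a < b) :
    PySem.List.pyRange a b s = a :: PySem.List.pyRange (a + s) b s := by
  rw [PySem.List.pyRange_of_pos _ _ hs, PySem.List.pyRange_of_pos _ _ hs, if_pos hab]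
  have h1 : b - a + s - 1 = (b - a - 1) + 1 * s := by ring
  have h2 : (b - a - 1) / s ≥ 0 := Int.ediv_nonneg (by omega) (by omega)
  rw [h1, Int.add_mul_ediv_right _ _ (by omega)]
  by_cases hc : a + s < b
  · rw [if_pos hc]
    have h3 : b - (a + s) + s - 1 = b - a - 1 := by ring
    rw [h3]
    have h4 : ((b - a - 1) / s + 1).toNat = ((b - a - 1) / s).toNat + 1 := by omega
    rw [h4, List.range_succ_eq_map]
    simp only [List.map_cons, List.map_map]
    congr 1
    · simp
    · apply List.map_congr_left
      intro x hx
      simp [Function.comp]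
      push_cast
      ring
  · rw [if_neg hc]
    have h5 : (b - a - 1) / s = 0 := Int.ediv_eq_zero_of_lt (by omega) (by omega)
    rw [h5]
    simp

def AlineF (values : List Int) (w n k : Int) (i : Int) : List Char :=
  '\t' :: PySem.Chars.join [' ']
      ((PySem.List.enumerate (PySem.List.slice values (some i) (some (i + k))) 0).foldl
        (fun rv jv => rv ++ [format_value jv.2 w ++ (if i + jv.1 == n - 1 then [] else [','])]) [])
    ++ ['\n']

theorem chunks_eq (w : Int) (values : List Int) (k : Int) (hk : 1 ≤ k) :
    ∀ (m i : Nat), i < values.length → (k ∣ (i : Int)) → m = values.length - i →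
      ((PySem.List.pyRange i (values.length : Int) k).map (AlineF values w (values.length : Int) k)).flatten
        = '\t' :: segB w (values.length : Int) k (values.drop i) i ++ ['\n'] := by
  intro m
  induction m using Nat.strong_induction_on with
  | _ m IH =>
    intro i hi hdvd hm
    have hn0 : (0:Int) ≤ (i:Int) := by positivity
    have hilt : ((i:Int)) < (values.length : Int) := by exact_mod_cast hi
    -- the chunk as take/drop
    have hslice : PySem.List.slice values (some (i:Int)) (some ((i:Int) + k))
        = List.take (((i:Int)+k).toNat - i) (List.drop i values) := by
      rw [PySem.List.slice_toNat values hn0 (by omega)]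
      simp
    have htn : ((i:Int)+k).toNat - i = k.toNat := by omega
    by_cases hlast : (values.length : Int) ≤ (i:Int) + k
    · -- last chunk
      rw [pyRange_pos_cons _ _ _ (by omega) hilt,
          pyRange_pos_nil _ _ _ (by omega) hlast]
      simp only [List.map_cons, List.map_nil, List.flatten_cons, List.flatten_nil, List.append_nil]
      rw [AlineF, hslice, htn]
      have htake : List.take k.toNat (List.drop i values) = List.drop i values := by
        apply List.take_of_length_le
        simp
        omega
      rw [htake]
      rw [PySem.List.foldl_append_singleton_eq_map
            (f := fun jv : Int × Int => format_value jv.2 w ++ (if (i:Int) + jv.1 == (values.length:Int) - 1 then [] else [','])) _ _]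
      rw [enumerate_shift (fun t v => format_value v w ++ (if t == (values.length:Int) - 1 then [] else [','])) _ 0 (i:Int)]
      rw [show ((i:Int) + 0) = (i:Int) by ring]
      rw [show (fun jv : Int × Int => format_value jv.2 w ++ (if jv.1 == (values.length:Int) - 1 then [] else [','])) = hA w (values.length:Int) from rfl]
      simp only [List.nil_append]
      rw [chunk_last w _ k (by omega) (List.drop i values) (i:Int)
            (by intro h; rw [List.drop_eq_nil_iff] at h; omega)
            (by simp; try omega)
            (by intro q hq1 hq2
                exact not_dvd_between k (i:Int) (q+1) (by omega) hdvd (by omega) (by omega))]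
    · -- middle chunk
      push_neg at hlast
      have hkn : ((k.toNat : Int)) = k := by omega
      rw [pyRange_pos_cons _ _ _ (by omega) hilt]
      simp only [List.map_cons, List.flatten_cons]
      have hcast : ((i:Int) + k) = ((i + k.toNat : Nat) : Int) := by push_cast; omega
      rw [hcast]
      rw [IH (values.length - (i + k.toNat)) (by omega) (i + k.toNat)
            (by omega)
            (by push_cast; rw [show ((i:Int) + (k.toNat:Int)) = (i:Int) + k by omega]; exact Dvd.dvd.add hdvd (dvd_refl k))
            rfl]
      rw [AlineF, hslice, htn]
      rw [PySem.List.foldl_append_singleton_eq_map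
            (f := fun jv : Int × Int => format_value jv.2 w ++ (if (i:Int) + jv.1 == (values.length:Int) - 1 then [] else [','])) _ _]
      rw [enumerate_shift (fun t v => format_value v w ++ (if t == (values.length:Int) - 1 then [] else [','])) _ 0 (i:Int)]
      rw [show ((i:Int) + 0) = (i:Int) by ring]
      rw [show (fun jv : Int × Int => format_value jv.2 w ++ (if jv.1 == (values.length:Int) - 1 then [] else [','])) = hA w (values.length:Int) from rfl]
      simp only [List.nil_append]
      -- split the remaining values at the chunk boundary
      have hsplit : List.drop i values
          = List.take k.toNat (List.drop i values) ++ List.drop (i + k.toNat) values := by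
        rw [← List.drop_drop]
        exact (List.take_append_drop _ _).symm
      have hlen : (List.take k.toNat (List.drop i values)).length = k.toNat := by
        simp
        omega
      rw [show segB w (values.length:Int) k (List.drop i values) (i:Int)
            = segB w (values.length:Int) k (List.take k.toNat (List.drop i values)) (i:Int)
              ++ segB w (values.length:Int) k (List.drop (i + k.toNat) values) ((i:Int) + (List.take k.toNat (List.drop i values)).length) by
          rw [← segB_append]; rw [← hsplit]]
      rw [chunk_mid w _ k (by omega) (List.take k.toNat (List.drop i values)) (i:Int)
            (by intro h; apply_fun List.length at h; simp at h; omega)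
            (by rw [hlen]; push_cast; omega)
            (by intro q hq1 hq2
                rw [hlen] at hq2
                exact not_dvd_between k (i:Int) (q+1) (by omega) hdvd (by omega) (by omega))
            (by rw [hlen]; rw [show ((i:Int) + (k.toNat:Int)) = (i:Int) + k by omega]; exact Dvd.dvd.add hdvd (dvd_refl k))]
      rw [hlen]
      rw [show ((i:Int) + (k.toNat:Int)) = ((i + k.toNat : Nat) : Int) by push_cast; ring]
      simp

-- ===== VERDICT (by name: the statement is the Claim_ definition above) =====
theorem build_source_spec : Claim_equal_build_source := by
  intro name values type_name values_per_line hdom hpre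
  unfold Spec_build_source
  obtain ⟨hsome, hvpl⟩ := hpre
  unfold build_source build_source_alt
  cases hget : PySem.Dict.get? TYPE_INFO type_name with
  | none => rfl
  | some wct =>
    by_cases h0 : values_per_line = 0
    · simp [h0]
    · have h0' : (values_per_line == 0) = false := by simp [h0]
      simp only [h0', Bool.false_eq_true, if_false]
      by_cases hemp : values = []
      · simp [hemp, join_nil_sep]
      · have hempb : values.isEmpty = false := by simp [hemp]
        have hk : 1 ≤ values_per_line := by
          rcases hvpl with h | h
          · omega
          · exact absurd h hemp
        simp only [hempb, Bool.false_eq_true, if_false]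
        have hfold : (fun (ls : List (List Char)) (i : Int) =>
            let chunk := PySem.List.slice values (some i) (some (i + values_per_line))
            let rendered_values := (PySem.List.enumerate chunk 0).foldl (fun rv jv =>
              rv ++ [format_value jv.2 wct.1 ++ (if i + jv.1 == (values.length : Int) - 1 then [] else [','])]) []
            ls ++ ['\t' :: PySem.Chars.join [' '] rendered_values ++ ['\n']])
            = fun (ls : List (List Char)) (i : Int) =>
                ls ++ [AlineF values wct.1 (values.length : Int) values_per_line i] := rfl
        rw [hfold, PySem.List.foldl_append_singleton_eq_map]
        have hlen0 : 0 < values.length := List.length_pos_iff.mpr hemp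
        have hchunks := chunks_eq wct.1 values values_per_line hk values.length 0
          hlen0 (by simp) (by simp)
        rw [show ((0 : Nat) : Int) = (0 : Int) by norm_num] at hchunks
        rw [List.drop_zero] at hchunks
        rw [segB_spec]
        rw [join_nil_sep]
        simp only [List.flatten_append, List.flatten_cons, List.flatten_nil,
          List.singleton_append, List.append_nil, List.nil_append]
        rw [hchunks]
        simp
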